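-- pv_equiv track=rewrite | github.com/lixixi89055465/leetcode_py | leetcode/100/130_solve_medium.py | solve
-- ===== SOURCE A (Python) =====
-- class UnionFind:
--     def __init__(self, totalNodes):
--         self.parents = [0 for i in range(totalNodes)]
--
--     def find(self, index):
--         while self.parents[index]:
--             index = self.parents[index]
--         return index
--
--     def union(self, index1, index2):
--         if self.find(index1) != self.find(index2):
--             self.parents[self.find(index1)] = self.find(index2)
--
--     def isConnected(self, node1, node2):
--         return self.find(node1) == self.find(node2)
--
-- def solve(board):
--     def node(r, c):
--         return r * cols + c
--
--     """
--     Do not return anything, modify board in-place instead.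
--     """
--     if not board:
--         return
--     rows = len(board)
--     cols = len(board[0])
--     uf = UnionFind(rows * cols + 1)
--     dummyNode = rows * cols
--     for i in range(rows):
--         for j in range(cols):
--             if board[i][j] == 'O':
--                 if i == 0 or i == rows - 1 or j == 0 or j == cols - 1:
--                     uf.union(node(i, j), dummyNode)
--                 else:
--                     if i > 0 and board[i - 1][j] == 'O':
--                         uf.union(node(i, j), node(i - 1, j))
--                     if i < rows - 1 and board[i + 1][j] == 'O':
--                         uf.union(node(i, j), node(i + 1, j))
--                     if j > 0 and board[i][j - 1] == 'O':
--                         uf.union(node(i, j), node(i, j - 1))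
--                     if j < cols - 1 and board[i][j + 1] == 'O':
--                         uf.union(node(i, j), node(i, j + 1))
--     for i in range(rows):
--         for j in range(cols):
--             if uf.isConnected(node(i, j), dummyNode):
--                 board[i][j] = 'O'
--             else:
--                 board[i][j] = 'X'
--     return board
-- ===== SOURCE B (Python) =====
-- def solve(board):
--     """
--     Do not return anything, modify board in-place instead.
--     """
--     if not board:
--         return
--     rows, cols = len(board), len(board[0])
--     # collect border 'O' cells, then saturate: a cell is safe iff it is an 'O'
--     # connected to the border through 'O' cells (fixpoint iteration).
--     safe = set()
--     for i in range(rows):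
--         for j in range(cols):
--             if board[i][j] == 'O' and (i == 0 or i == rows - 1 or j == 0 or j == cols - 1):
--                 safe.add((i, j))
--     changed = True
--     while changed:
--         changed = False
--         for i in range(rows):
--             for j in range(cols):
--                 if (i, j) not in safe and board[i][j] == 'O' and (
--                         (i > 0 and (i - 1, j) in safe)
--                         or (i + 1 < rows and (i + 1, j) in safe)
--                         or (j > 0 and (i, j - 1) in safe)
--                         or (j + 1 < cols and (i, j + 1) in safe)):
--                     safe.add((i, j))
--                     changed = True
--     for i in range(rows):
--         for j in range(cols):
--             board[i][j] = 'O' if (i, j) in safe else 'X'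
--     return board
-- ===== Notes on version B (the rewrite author's own statement) =====
-- stated objective: alternative
-- what changed: Replaced the union-find over rows*cols+1 nodes (pointer-chasing find loops per cell) by a direct flood-fill fixpoint: seed the set of border 'O' cells, then sweep the grid until no new border-connected 'O' cell is added, and render from that set.
-- outside the precondition, e.g. on solve([]): A returns None, B returns None
import Mathlib
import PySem

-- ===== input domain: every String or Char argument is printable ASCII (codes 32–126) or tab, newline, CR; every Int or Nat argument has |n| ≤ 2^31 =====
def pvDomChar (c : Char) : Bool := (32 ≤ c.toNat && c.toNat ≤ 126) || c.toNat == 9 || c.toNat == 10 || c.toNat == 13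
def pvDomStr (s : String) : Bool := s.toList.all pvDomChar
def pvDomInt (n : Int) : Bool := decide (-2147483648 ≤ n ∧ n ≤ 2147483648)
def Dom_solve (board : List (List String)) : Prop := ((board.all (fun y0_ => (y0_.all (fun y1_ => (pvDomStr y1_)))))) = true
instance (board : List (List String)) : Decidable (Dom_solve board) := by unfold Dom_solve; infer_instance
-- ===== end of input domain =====

-- B replaces A's union-find over rows*cols+1 nodes by a direct flood-fill fixpoint
-- (seed border 'O' cells, sweep until stable, render from the safe set); equal return
-- value proved; like A, the Python B also mutates `board` in place (same mutation).

-- ===== PORT A =====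
-- UnionFind.find: while self.parents[index]: index = self.parents[index]
-- (fuel makes the loop total; every reachable state is an acyclic forest, where
-- fuel = len(parents) suffices; getD is exact for the in-range indices used here)
def ufFind (parents : List Nat) (fuel : Nat) (index : Nat) : Nat :=
  match fuel with
  | 0 => index
  | f + 1 =>
    let p := parents.getD index 0
    if p ≠ 0 then ufFind parents f p else index

-- UnionFind.union
def ufUnion (parents : List Nat) (a b : Nat) : List Nat :=
  if ufFind parents parents.length a ≠ ufFind parents parents.length b then
    parents.set (ufFind parents parents.length a) (ufFind parents parents.length b)
  else parents

-- board[i][j] == 'O'  (defaults exact: indices are in range on Pre_ inputs)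
def cellO (board : List (List String)) (i j : Nat) : Bool :=
  (board.getD i []).getD j "" == "O"

def solve (board : List (List String)) : List (List String) :=
  if board.isEmpty then board  -- Python `return` (None) here; excluded by Pre_solve
  else
    let rows := board.length
    let cols := board.headI.length
    let dummy := rows * cols
    let parents :=
      (List.range rows).foldl (fun ps i =>
        (List.range cols).foldl (fun ps j =>
          if cellO board i j then
            if i = 0 ∨ i = rows - 1 ∨ j = 0 ∨ j = cols - 1 then
              ufUnion ps (i * cols + j) dummy
            else
              let ps := if 0 < i ∧ cellO board (i-1) j then ufUnion ps (i*cols+j) ((i-1)*cols+j) else ps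
              let ps := if i < rows - 1 ∧ cellO board (i+1) j then ufUnion ps (i*cols+j) ((i+1)*cols+j) else ps
              let ps := if 0 < j ∧ cellO board i (j-1) then ufUnion ps (i*cols+j) (i*cols+(j-1)) else ps
              let ps := if j < cols - 1 ∧ cellO board i (j+1) then ufUnion ps (i*cols+j) (i*cols+(j+1)) else ps
              ps
          else ps) ps)
        (List.replicate (rows * cols + 1) 0)
    (List.range rows).foldl (fun b i =>
      (List.range cols).foldl (fun b j =>
        b.set i ((b.getD i []).set j
          (if ufFind parents parents.length (i * cols + j) = ufFind parents parents.length dummy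
           then "O" else "X"))) b) board

-- ===== PORT B =====
-- safe = { border 'O' cells }
def bBorderSafe (board : List (List String)) (rows cols : Nat) : PySem.Set (Nat × Nat) :=
  (List.range rows).foldl (fun s i =>
    (List.range cols).foldl (fun s j =>
      if cellO board i j ∧ (i = 0 ∨ i = rows - 1 ∨ j = 0 ∨ j = cols - 1)
      then PySem.Set.add s (i, j) else s) s) PySem.Set.empty

-- one `for i: for j:` sweep of the while-body; .2 is `changed`
def bSweep (board : List (List String)) (rows cols : Nat)
    (safe : PySem.Set (Nat × Nat)) : PySem.Set (Nat × Nat) × Bool :=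
  (List.range rows).foldl (fun st i =>
    (List.range cols).foldl (fun st j =>
      if ¬ PySem.Set.contains st.1 (i, j) ∧ cellO board i j ∧
          ((0 < i ∧ PySem.Set.contains st.1 (i-1, j)) ∨
           (i + 1 < rows ∧ PySem.Set.contains st.1 (i+1, j)) ∨
           (0 < j ∧ PySem.Set.contains st.1 (i, j-1)) ∨
           (j + 1 < cols ∧ PySem.Set.contains st.1 (i, j+1)))
      then (PySem.Set.add st.1 (i, j), true) else st) st) (safe, false)

-- while changed: … (fuel rows*cols+1 provably suffices: each changed sweep grows safe)
def bLoop (board : List (List String)) (rows cols : Nat)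
    (fuel : Nat) (safe : PySem.Set (Nat × Nat)) : PySem.Set (Nat × Nat) :=
  match fuel with
  | 0 => safe
  | f + 1 =>
    let sc := bSweep board rows cols safe
    if sc.2 then bLoop board rows cols f sc.1 else sc.1

def solve_alt (board : List (List String)) : List (List String) :=
  if board.isEmpty then board  -- Python `return` (None) here; excluded by Pre_solve
  else
    let rows := board.length
    let cols := board.headI.length
    let safe := bLoop board rows cols (rows * cols + 1) (bBorderSafe board rows cols)
    (List.range rows).foldl (fun b i =>
      (List.range cols).foldl (fun b j =>
        b.set i ((b.getD i []).set j
          (if PySem.Set.contains safe (i, j) then "O" else "X"))) b) board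

-- ===== PRECONDITION & SPEC =====
-- Pre_ excludes the empty board, where A returns None (not a list), and ragged
-- boards with a row shorter than the first row, where A raises IndexError.
def Pre_solve (board : List (List String)) : Prop :=
  board ≠ [] ∧ ∀ row ∈ board, board.headI.length ≤ row.length
instance (board : List (List String)) : Decidable (Pre_solve board) := by unfold Pre_solve; infer_instance
def pvWitness_solve : List (List String) := [["O"]]

def Spec_solve (board : List (List String)) (out : List (List String)) : Prop := out = solve_alt board
instance (board : List (List String)) (out : List (List String)) : Decidable (Spec_solve board out) := by unfold Spec_solve; infer_instance

-- ===== CLAIM (what is proved, stated in full; the proofs are below) =====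
def Claim_equal_solve : Prop := ∀ (board : List (List String)), Dom_solve board → Pre_solve board → Spec_solve board (solve board)

-- ===== LEMMAS AND PROOFS =====

-- ---- shared ghost notions ----

def cellList (rows cols : Nat) : List (Nat × Nat) :=
  (List.range rows).flatMap (fun i => (List.range cols).map (fun j => (i, j)))

lemma mem_cellList {rows cols i j : Nat} :
    (i, j) ∈ cellList rows cols ↔ i < rows ∧ j < cols := by
  simp [cellList]

-- a double `for i: for j:` fold is a fold over the cell list
lemma double_foldl_eq {σ : Type} (rows cols : Nat) (f : σ → Nat × Nat → σ) (init : σ) :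
    (List.range rows).foldl (fun s i => (List.range cols).foldl (fun s j => f s (i, j)) s) init
      = (cellList rows cols).foldl f init := by
  unfold cellList
  induction (List.range rows) generalizing init with
  | nil => rfl
  | cons i t ih => simp only [List.foldl_cons, List.flatMap_cons, List.foldl_append, ih, List.foldl_map]

def adjacentCell (i j i' j' : Nat) : Prop :=
  (i' = i + 1 ∧ j' = j) ∨ (i = i' + 1 ∧ j' = j) ∨ (i' = i ∧ j' = j + 1) ∨ (i' = i ∧ j = j' + 1)

-- the specification relation: (i,j) is an 'O' cell connected to the border through 'O' cells
inductive Reach (board : List (List String)) : Nat → Nat → Prop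
  | base (i j : Nat) (hi : i < board.length) (hj : j < board.headI.length)
      (hO : cellO board i j = true)
      (hb : i = 0 ∨ i = board.length - 1 ∨ j = 0 ∨ j = board.headI.length - 1) : Reach board i j
  | step (i j i' j' : Nat) (hi : i < board.length) (hj : j < board.headI.length)
      (hO : cellO board i j = true) (hadj : adjacentCell i j i' j')
      (hr : Reach board i' j') : Reach board i j

lemma reach_bounds {board : List (List String)} {i j : Nat} (h : Reach board i j) :
    i < board.length ∧ j < board.headI.length ∧ cellO board i j = true := by
  cases h with
  | base i j hi hj hO hb => exact ⟨hi, hj, hO⟩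
  | step i j i' j' hi hj hO hadj hr => exact ⟨hi, hj, hO⟩

-- ---- A side: the union loop as a fold over a list of union pairs ----

def cellPairs (board : List (List String)) (rows cols i j : Nat) : List (Nat × Nat) :=
  if cellO board i j then
    if i = 0 ∨ i = rows - 1 ∨ j = 0 ∨ j = cols - 1 then [(i*cols+j, rows*cols)]
    else
      (if 0 < i ∧ cellO board (i-1) j then [(i*cols+j, (i-1)*cols+j)] else []) ++
      (if i < rows - 1 ∧ cellO board (i+1) j then [(i*cols+j, (i+1)*cols+j)] else []) ++
      (if 0 < j ∧ cellO board i (j-1) then [(i*cols+j, i*cols+(j-1))] else []) ++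
      (if j < cols - 1 ∧ cellO board i (j+1) then [(i*cols+j, i*cols+(j+1))] else [])
  else []

def unionPairs (board : List (List String)) (rows cols : Nat) : List (Nat × Nat) :=
  (cellList rows cols).flatMap (fun p => cellPairs board rows cols p.1 p.2)

def unionP (ps : List Nat) (pr : Nat × Nat) : List Nat := ufUnion ps pr.1 pr.2

lemma unionLoop_eq_foldl_pairs (board : List (List String)) (rows cols : Nat) (init : List Nat) :
    (List.range rows).foldl (fun ps i =>
        (List.range cols).foldl (fun ps j =>
          if cellO board i j then
            if i = 0 ∨ i = rows - 1 ∨ j = 0 ∨ j = cols - 1 then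
              ufUnion ps (i * cols + j) (rows * cols)
            else
              let ps := if 0 < i ∧ cellO board (i-1) j then ufUnion ps (i*cols+j) ((i-1)*cols+j) else ps
              let ps := if i < rows - 1 ∧ cellO board (i+1) j then ufUnion ps (i*cols+j) ((i+1)*cols+j) else ps
              let ps := if 0 < j ∧ cellO board i (j-1) then ufUnion ps (i*cols+j) (i*cols+(j-1)) else ps
              let ps := if j < cols - 1 ∧ cellO board i (j+1) then ufUnion ps (i*cols+j) (i*cols+(j+1)) else ps
              ps
          else ps) ps) init
      = List.foldl unionP init (unionPairs board rows cols) := by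
  rw [double_foldl_eq rows cols (fun ps (p : Nat × Nat) =>
      if cellO board p.1 p.2 then
        if p.1 = 0 ∨ p.1 = rows - 1 ∨ p.2 = 0 ∨ p.2 = cols - 1 then
          ufUnion ps (p.1 * cols + p.2) (rows * cols)
        else
          let ps := if 0 < p.1 ∧ cellO board (p.1-1) p.2 then ufUnion ps (p.1*cols+p.2) ((p.1-1)*cols+p.2) else ps
          let ps := if p.1 < rows - 1 ∧ cellO board (p.1+1) p.2 then ufUnion ps (p.1*cols+p.2) ((p.1+1)*cols+p.2) else ps
          let ps := if 0 < p.2 ∧ cellO board p.1 (p.2-1) then ufUnion ps (p.1*cols+p.2) (p.1*cols+(p.2-1)) else ps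
          let ps := if p.2 < cols - 1 ∧ cellO board p.1 (p.2+1) then ufUnion ps (p.1*cols+p.2) (p.1*cols+(p.2+1)) else ps
          ps
      else ps) init]
  rw [unionPairs, List.foldl_flatMap]
  apply PySem.List.foldl_congr_mem
  intro acc x _
  obtain ⟨i, j⟩ := x
  show _ = List.foldl unionP acc (cellPairs board rows cols i j)
  simp only [cellPairs]
  split_ifs <;> simp [unionP]

-- ---- union-find theory ----

structure UFInv (parents : List Nat) (ρ dep : Nat → Nat) : Prop where
  bound : ∀ k, k < parents.length → parents.getD k 0 < parents.length
  root0 : ∀ k, k < parents.length → parents.getD k 0 = 0 → ρ k = k ∧ dep k = 0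
  pstep : ∀ k, k < parents.length → parents.getD k 0 ≠ 0 →
            ρ k = ρ (parents.getD k 0) ∧ dep k = dep (parents.getD k 0) + 1
  zero : ∀ k, k < parents.length → k ≠ 0 → ρ k ≠ 0
  rho_lt : ∀ k, k < parents.length → ρ k < parents.length

lemma ufFind_eq_rho {parents : List Nat} {ρ dep : Nat → Nat} (h : UFInv parents ρ dep) :
    ∀ fuel k, k < parents.length → dep k < fuel → ufFind parents fuel k = ρ k := by
  intro fuel
  induction fuel with
  | zero => intro k _ hd; omega
  | succ f ih =>
    intro k hk hd
    show (if parents.getD k 0 ≠ 0 then ufFind parents f (parents.getD k 0) else k) = ρ k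
    by_cases hp : parents.getD k 0 = 0
    · simp only [hp, ne_eq, not_true_eq_false, if_false]
      exact ((h.root0 k hk hp).1).symm
    · obtain ⟨hρ, hdep⟩ := h.pstep k hk hp
      simp only [hp, ne_eq, not_false_eq_true, if_true]
      rw [ih (parents.getD k 0) (h.bound k hk) (by omega), hρ]

lemma rho_root {parents : List Nat} {ρ dep : Nat → Nat} (h : UFInv parents ρ dep) :
    ∀ k, k < parents.length → parents.getD (ρ k) 0 = 0 ∧ dep (ρ k) = 0 ∧ ρ (ρ k) = ρ k := by
  suffices H : ∀ d k, dep k = d → k < parents.length →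
      parents.getD (ρ k) 0 = 0 ∧ dep (ρ k) = 0 ∧ ρ (ρ k) = ρ k by
    intro k hk; exact H (dep k) k rfl hk
  intro d
  induction d using Nat.strong_induction_on with
  | _ d ih =>
    intro k hd hk
    by_cases hp : parents.getD k 0 = 0
    · obtain ⟨h1, h2⟩ := h.root0 k hk hp
      rw [h1]; exact ⟨hp, h2, h1⟩
    · obtain ⟨hρ, hdep⟩ := h.pstep k hk hp
      rw [hρ]
      exact ih (dep (parents.getD k 0)) (by omega) _ rfl (h.bound k hk)

lemma dep_lt_len {parents : List Nat} {ρ dep : Nat → Nat} (h : UFInv parents ρ dep) :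
    ∀ k, k < parents.length → dep k < parents.length := by
  intro k hk
  set c : Nat → Nat := fun m => (fun x => parents.getD x 0)^[m] k with hc
  have key : ∀ m, m ≤ dep k → c m < parents.length ∧ dep (c m) + m = dep k := by
    intro m
    induction m with
    | zero => intro _; exact ⟨hk, rfl⟩
    | succ m ihm =>
      intro hm
      obtain ⟨h1, h2⟩ := ihm (by omega)
      have hd0 : dep (c m) ≠ 0 := by omega
      have hp : parents.getD (c m) 0 ≠ 0 := by
        intro h0; exact hd0 (h.root0 _ h1 h0).2
      obtain ⟨_, hdep⟩ := h.pstep _ h1 hp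
      have hcs : c (m + 1) = parents.getD (c m) 0 := by
        simp only [hc, Function.iterate_succ_apply']
      constructor
      · rw [hcs]; exact h.bound _ h1
      · rw [hcs]; omega
  by_contra hlt
  have hle : parents.length ≤ dep k := by omega
  have inj : Function.Injective (fun m : Fin (dep k + 1) => (⟨c m.1, (key m.1 (by omega)).1⟩ : Fin parents.length)) := by
    intro m1 m2 heq
    have e : c m1.1 = c m2.1 := congrArg Fin.val heq
    have e1 := (key m1.1 (by omega)).2
    have e2 := (key m2.1 (by omega)).2
    rw [e] at e1
    exact Fin.ext (by omega)
  have := Fintype.card_le_of_injective _ inj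
  simp [Fintype.card_fin] at this
  omega

lemma ufUnion_spec {parents : List Nat} {ρ dep : Nat → Nat} (h : UFInv parents ρ dep)
    {a b : Nat} (ha : a < parents.length) (hb : b < parents.length) (hb0 : b ≠ 0) :
    ∃ ρ' dep', UFInv (ufUnion parents a b) ρ' dep' ∧
      (ufUnion parents a b).length = parents.length ∧
      (∀ x y, ρ' x = ρ' y ↔
        (ρ x = ρ y ∨ (ρ x = ρ a ∧ ρ y = ρ b) ∨ (ρ x = ρ b ∧ ρ y = ρ a))) := by
  have hfa : ufFind parents parents.length a = ρ a :=
    ufFind_eq_rho h _ a ha (dep_lt_len h a ha)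
  have hfb : ufFind parents parents.length b = ρ b :=
    ufFind_eq_rho h _ b hb (dep_lt_len h b hb)
  have hr1 : ρ a < parents.length := h.rho_lt a ha
  have hr2 : ρ b < parents.length := h.rho_lt b hb
  have hr20 : ρ b ≠ 0 := h.zero b hb hb0
  obtain ⟨hroot1, hdep1, hidem1⟩ := rho_root h a ha
  obtain ⟨hroot2, hdep2, hidem2⟩ := rho_root h b hb
  by_cases hne : ρ a = ρ b
  · refine ⟨ρ, dep, ?_, ?_, ?_⟩
    · have : ufUnion parents a b = parents := by
        unfold ufUnion; rw [hfa, hfb, hne]; simp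
      rw [this]; exact h
    · have : ufUnion parents a b = parents := by
        unfold ufUnion; rw [hfa, hfb, hne]; simp
      rw [this]
    · intro x y
      constructor
      · exact fun hxy => Or.inl hxy
      · rintro (hxy | ⟨h1, h2⟩ | ⟨h1, h2⟩) <;> omega
  · have hset : ufUnion parents a b = parents.set (ρ a) (ρ b) := by
      unfold ufUnion; rw [hfa, hfb]; simp [hne]
    have hgetD : ∀ k, (parents.set (ρ a) (ρ b)).getD k 0
        = if k = ρ a then ρ b else parents.getD k 0 := by
      intro k
      by_cases hkm : k = ρ a
      · subst hkm
        simp [List.getD_eq_getElem?_getD, hr1]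
      · simp [List.getD_eq_getElem?_getD, List.getElem?_set_ne (fun h => hkm h.symm), hkm]
    refine ⟨fun x => if ρ x = ρ a then ρ b else ρ x,
            fun x => if ρ x = ρ a then dep x + 1 else dep x, ?_, ?_, ?_⟩
    · rw [hset]
      constructor
      all_goals simp only [List.length_set]
      · intro k hk
        rw [hgetD k]
        split_ifs with h1
        · exact hr2
        · exact h.bound k hk
      · intro k hk hk0
        rw [hgetD k] at hk0
        split_ifs at hk0 with h1
        · exact absurd hk0 hr20
        · obtain ⟨e1, e2⟩ := h.root0 k hk hk0
          have hne' : ρ k ≠ ρ a := by rw [e1]; exact h1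
          rw [if_neg hne', if_neg hne']
          exact ⟨e1, e2⟩
      · intro k hk hk0
        by_cases hka : k = ρ a
        · rw [hgetD k, if_pos hka]
          have hρk : ρ k = ρ a := by rw [hka, hidem1]
          refine ⟨?_, ?_⟩
          · show (if ρ k = ρ a then ρ b else ρ k) = (if ρ (ρ b) = ρ a then ρ b else ρ (ρ b))
            rw [if_pos hρk, hidem2, if_neg (fun hh => hne hh.symm)]
          · show (if ρ k = ρ a then dep k + 1 else dep k)
              = (if ρ (ρ b) = ρ a then dep (ρ b) + 1 else dep (ρ b)) + 1
            rw [if_pos hρk, hidem2, if_neg (fun hh => hne hh.symm)]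
            have hdk : dep k = 0 := by rw [hka]; exact hdep1
            omega
        · rw [hgetD k, if_neg hka] at hk0 ⊢
          obtain ⟨e1, e2⟩ := h.pstep k hk hk0
          refine ⟨?_, ?_⟩
          · show (if ρ k = ρ a then ρ b else ρ k)
              = (if ρ (parents.getD k 0) = ρ a then ρ b else ρ (parents.getD k 0))
            rw [e1]
          · show (if ρ k = ρ a then dep k + 1 else dep k)
              = (if ρ (parents.getD k 0) = ρ a then dep (parents.getD k 0) + 1
                 else dep (parents.getD k 0)) + 1
            rw [e1]
            split_ifs <;> omega
      · intro k hk hk0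
        split_ifs with h1
        · exact hr20
        · exact h.zero k hk hk0
      · intro k hk
        split_ifs with h1
        · exact hr2
        · exact h.rho_lt k hk
    · rw [hset]; exact List.length_set ..
    · intro x y
      show (if ρ x = ρ a then ρ b else ρ x) = (if ρ y = ρ a then ρ b else ρ y) ↔ _
      by_cases c1 : ρ x = ρ a <;> by_cases c2 : ρ y = ρ a
      · rw [if_pos c1, if_pos c2]
        exact ⟨fun _ => Or.inl (c1.trans c2.symm), fun _ => rfl⟩
      · rw [if_pos c1, if_neg c2]
        constructor
        · intro hh; exact Or.inr (Or.inl ⟨c1, hh.symm⟩)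
        · rintro (hh | ⟨e1, e2⟩ | ⟨e1, e2⟩)
          · exact absurd (hh.symm.trans c1) c2
          · exact e2.symm
          · exact absurd (e1.symm.trans c1).symm hne
      · rw [if_neg c1, if_pos c2]
        constructor
        · intro hh; exact Or.inr (Or.inr ⟨hh, c2⟩)
        · rintro (hh | ⟨e1, e2⟩ | ⟨e1, e2⟩)
          · exact absurd (hh.trans c2) c1
          · exact absurd e1 c1
          · exact e1
      · rw [if_neg c1, if_neg c2]
        constructor
        · exact fun hh => Or.inl hh
        · rintro (hh | ⟨e1, e2⟩ | ⟨e1, e2⟩)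
          · exact hh
          · exact absurd e1 c1
          · exact absurd e2 c2

-- equivalence generated by a pair list
def EG (L : List (Nat × Nat)) (x y : Nat) : Prop := Relation.EqvGen (fun u v => (u, v) ∈ L) x y

lemma EG_nil {x y : Nat} : EG [] x y ↔ x = y := by
  constructor
  · intro h
    induction h with
    | rel u v huv => simp at huv
    | refl x => rfl
    | symm x y _ ih => exact ih.symm
    | trans x y z _ _ ih1 ih2 => exact ih1.trans ih2
  · rintro rfl; exact Relation.EqvGen.refl _

lemma EG_snoc {L : List (Nat × Nat)} {a b x y : Nat} :
    EG (L ++ [(a, b)]) x y ↔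
      EG L x y ∨ (EG L x a ∧ EG L b y) ∨ (EG L x b ∧ EG L a y) := by
  have tr : ∀ {u v w : Nat}, EG L u v → EG L v w → EG L u w :=
    fun h1 h2 => Relation.EqvGen.trans _ _ _ h1 h2
  have sy : ∀ {u v : Nat}, EG L u v → EG L v u :=
    fun h => Relation.EqvGen.symm _ _ h
  constructor
  · intro h
    induction h with
    | rel u v huv =>
      rcases List.mem_append.1 huv with h | h
      · exact Or.inl (Relation.EqvGen.rel _ _ h)
      · simp only [List.mem_singleton, Prod.mk.injEq] at h
        obtain ⟨rfl, rfl⟩ := h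
        exact Or.inr (Or.inl ⟨Relation.EqvGen.refl _, Relation.EqvGen.refl _⟩)
    | refl x => exact Or.inl (Relation.EqvGen.refl _)
    | symm x y _ ih =>
      rcases ih with h | ⟨h1, h2⟩ | ⟨h1, h2⟩
      · exact Or.inl (sy h)
      · exact Or.inr (Or.inr ⟨sy h2, sy h1⟩)
      · exact Or.inr (Or.inl ⟨sy h2, sy h1⟩)
    | trans x y z _ _ ih1 ih2 =>
      rcases ih1 with h1 | ⟨h1a, h1b⟩ | ⟨h1a, h1b⟩ <;>
        rcases ih2 with h2 | ⟨h2a, h2b⟩ | ⟨h2a, h2b⟩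
      · exact Or.inl (tr h1 h2)
      · exact Or.inr (Or.inl ⟨tr h1 h2a, h2b⟩)
      · exact Or.inr (Or.inr ⟨tr h1 h2a, h2b⟩)
      · exact Or.inr (Or.inl ⟨h1a, tr h1b h2⟩)
      · exact Or.inl (tr h1a (tr (sy h2a) (tr (sy h1b) h2b)))
      · exact Or.inl (tr h1a h2b)
      · exact Or.inr (Or.inr ⟨h1a, tr h1b h2⟩)
      · exact Or.inl (tr h1a h2b)
      · exact Or.inl (tr h1a (tr (sy h2a) (tr (sy h1b) h2b)))
  · have mono : ∀ {u v : Nat}, EG L u v → EG (L ++ [(a, b)]) u v := by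
      intro u v h
      exact Relation.EqvGen.mono (fun p q hpq => List.mem_append.2 (Or.inl hpq)) h
    have hab : EG (L ++ [(a, b)]) a b :=
      Relation.EqvGen.rel _ _ (List.mem_append.2 (Or.inr (List.mem_singleton.2 rfl)))
    rintro (h | ⟨h1, h2⟩ | ⟨h1, h2⟩)
    · exact mono h
    · exact Relation.EqvGen.trans _ _ _ (mono h1)
        (Relation.EqvGen.trans _ _ _ hab (mono h2))
    · exact Relation.EqvGen.trans _ _ _ (mono h1)
        (Relation.EqvGen.trans _ _ _ (Relation.EqvGen.symm _ _ hab) (mono h2))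

lemma foldl_unionP_spec :
    ∀ (L : List (Nat × Nat)) (parents : List Nat) (ρ dep : Nat → Nat) (pre : List (Nat × Nat)),
      UFInv parents ρ dep →
      (∀ x y, ρ x = ρ y ↔ EG pre x y) →
      (∀ p ∈ L, p.1 < parents.length ∧ p.2 < parents.length ∧ p.2 ≠ 0) →
      ∃ ρ' dep', UFInv (List.foldl unionP parents L) ρ' dep' ∧
        (List.foldl unionP parents L).length = parents.length ∧
        (∀ x y, ρ' x = ρ' y ↔ EG (pre ++ L) x y) := by
  intro L
  induction L with
  | nil =>
    intro parents ρ dep pre hInv hchar _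
    exact ⟨ρ, dep, hInv, rfl, by simpa using hchar⟩
  | cons p t ih =>
    obtain ⟨a, b⟩ := p
    intro parents ρ dep pre hInv hchar hL
    obtain ⟨ha, hb, hb0⟩ := hL (a, b) (List.mem_cons_self ..)
    obtain ⟨ρ1, dep1, hInv1, hlen1, hchar1⟩ := ufUnion_spec hInv ha hb hb0
    have hchar1' : ∀ x y, ρ1 x = ρ1 y ↔ EG (pre ++ [(a, b)]) x y := by
      intro x y
      rw [hchar1 x y, EG_snoc, ← hchar x y, ← hchar x a, ← hchar b y, ← hchar x b, ← hchar a y]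
      constructor
      · rintro (hh | ⟨e1, e2⟩ | ⟨e1, e2⟩)
        · exact Or.inl hh
        · exact Or.inr (Or.inl ⟨e1, e2.symm⟩)
        · exact Or.inr (Or.inr ⟨e1, e2.symm⟩)
      · rintro (hh | ⟨e1, e2⟩ | ⟨e1, e2⟩)
        · exact Or.inl hh
        · exact Or.inr (Or.inl ⟨e1, e2.symm⟩)
        · exact Or.inr (Or.inr ⟨e1, e2.symm⟩)
    have hbounds : ∀ q ∈ t, q.1 < (ufUnion parents a b).length ∧
        q.2 < (ufUnion parents a b).length ∧ q.2 ≠ 0 := by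
      intro q hq
      rw [hlen1]
      exact hL q (List.mem_cons_of_mem _ hq)
    obtain ⟨ρ', dep', hInv', hlen', hchar'⟩ :=
      ih (ufUnion parents a b) ρ1 dep1 (pre ++ [(a, b)]) hInv1 hchar1' hbounds
    refine ⟨ρ', dep', ?_, ?_, ?_⟩
    · simpa [unionP] using hInv'
    · show (List.foldl unionP (unionP parents (a, b)) t).length = parents.length
      rw [show unionP parents (a, b) = ufUnion parents a b from rfl, hlen', hlen1]
    · intro x y
      rw [hchar' x y, List.append_assoc]
      rfl

-- ---- the pair list versus Reach ----

lemma node_lt {i j rows cols : Nat} (hi : i < rows) (hj : j < cols) :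
    i * cols + j < rows * cols := by
  calc i * cols + j < i * cols + cols := by omega
  _ = (i + 1) * cols := by ring
  _ ≤ rows * cols := Nat.mul_le_mul_right _ (by omega)

lemma node_inj {i j i' j' cols : Nat} (hj : j < cols) (hj' : j' < cols)
    (h : i * cols + j = i' * cols + j') : i = i' ∧ j = j' := by
  have hc : 0 < cols := by omega
  have h1 : (i * cols + j) / cols = i := by
    rw [Nat.mul_comm, Nat.mul_add_div hc, Nat.div_eq_of_lt hj]; omega
  have h2 : (i' * cols + j') / cols = i' := by
    rw [Nat.mul_comm, Nat.mul_add_div hc, Nat.div_eq_of_lt hj']; omega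
  have hii : i = i' := by rw [← h1, ← h2, h]
  subst hii
  exact ⟨rfl, by omega⟩

lemma mem_ite_singleton {α : Type} {c : Prop} [Decidable c] {x p : α}
    (h : p ∈ (if c then [x] else ([] : List α))) : c ∧ p = x := by
  split_ifs at h with hc
  · exact ⟨hc, List.mem_singleton.1 h⟩
  · simp at h

lemma mem_unionPairs_bounds {board : List (List String)} {rows cols : Nat}
    (hr : 0 < rows) :
    ∀ p ∈ unionPairs board rows cols, p.1 < rows * cols + 1 ∧ p.2 < rows * cols + 1 ∧ p.2 ≠ 0 := by
  intro p hp
  rw [unionPairs, List.mem_flatMap] at hp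
  obtain ⟨⟨i, j⟩, hcell, hpc⟩ := hp
  obtain ⟨hi, hj⟩ := mem_cellList.1 hcell
  have hcols : 0 < cols := by omega
  have hN : 0 < rows * cols := Nat.mul_pos hr hcols
  simp only [cellPairs] at hpc
  by_cases hO : cellO board i j = true
  case neg => rw [if_neg hO] at hpc; simp at hpc
  rw [if_pos hO] at hpc
  by_cases hb : i = 0 ∨ i = rows - 1 ∨ j = 0 ∨ j = cols - 1
  · rw [if_pos hb] at hpc
    simp only [List.mem_singleton] at hpc
    subst hpc
    exact ⟨by have := node_lt hi hj; omega, by omega, by omega⟩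
  · rw [if_neg hb] at hpc
    push_neg at hb
    obtain ⟨hb1, hb2, hb3, hb4⟩ := hb
    simp only [List.mem_append] at hpc
    rcases hpc with ((h1 | h2) | h3) | h4
    · obtain ⟨hc, rfl⟩ := mem_ite_singleton h1
      have := node_lt hi hj
      have h2 := node_lt (show i - 1 < rows by omega) hj
      refine ⟨by omega, by omega, ?_⟩
      intro h0
      have := (Nat.add_eq_zero.mp h0).2
      omega
    · obtain ⟨hc, rfl⟩ := mem_ite_singleton h2
      have := node_lt hi hj
      have h2 := node_lt (show i + 1 < rows by omega) hj
      refine ⟨by omega, by omega, ?_⟩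
      intro h0
      exact Nat.mul_ne_zero (by omega) (by omega) (Nat.add_eq_zero.mp h0).1
    · obtain ⟨hc, rfl⟩ := mem_ite_singleton h3
      have := node_lt hi hj
      have h2 := node_lt hi (show j - 1 < cols by omega)
      refine ⟨by omega, by omega, ?_⟩
      intro h0
      exact Nat.mul_ne_zero (by omega) (by omega) (Nat.add_eq_zero.mp h0).1
    · obtain ⟨hc, rfl⟩ := mem_ite_singleton h4
      have := node_lt hi hj
      have h2 := node_lt hi (show j + 1 < cols by omega)
      refine ⟨by omega, by omega, ?_⟩
      intro h0
      have := (Nat.add_eq_zero.mp h0).2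
      omega

lemma mem_unionPairs_elim {board : List (List String)} {rows cols u v : Nat}
    (h : (u, v) ∈ unionPairs board rows cols) :
    ∃ i j, i < rows ∧ j < cols ∧ cellO board i j = true ∧ u = i * cols + j ∧
      ((v = rows * cols ∧ (i = 0 ∨ i = rows - 1 ∨ j = 0 ∨ j = cols - 1)) ∨
       (∃ i' j', i' < rows ∧ j' < cols ∧ cellO board i' j' = true ∧
          adjacentCell i j i' j' ∧ v = i' * cols + j')) := by
  rw [unionPairs, List.mem_flatMap] at h
  obtain ⟨⟨i, j⟩, hcell, hpc⟩ := h
  obtain ⟨hi, hj⟩ := mem_cellList.1 hcell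
  refine ⟨i, j, hi, hj, ?_⟩
  simp only [cellPairs] at hpc
  by_cases hO : cellO board i j = true
  case neg => rw [if_neg hO] at hpc; simp at hpc
  rw [if_pos hO] at hpc
  by_cases hb : i = 0 ∨ i = rows - 1 ∨ j = 0 ∨ j = cols - 1
  · rw [if_pos hb] at hpc
    simp only [List.mem_singleton, Prod.mk.injEq] at hpc
    obtain ⟨rfl, rfl⟩ := hpc
    exact ⟨hO, rfl, Or.inl ⟨rfl, hb⟩⟩
  · rw [if_neg hb] at hpc
    push_neg at hb
    obtain ⟨hb1, hb2, hb3, hb4⟩ := hb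
    simp only [List.mem_append] at hpc
    rcases hpc with ((h1 | h2) | h3) | h4
    · obtain ⟨⟨hc1, hc2⟩, heq⟩ := mem_ite_singleton h1
      obtain ⟨rfl, rfl⟩ := Prod.mk.injEq .. ▸ heq
      exact ⟨hO, rfl, Or.inr ⟨i - 1, j, by omega, hj, hc2,
        Or.inr (Or.inl ⟨by omega, rfl⟩), rfl⟩⟩
    · obtain ⟨⟨hc1, hc2⟩, heq⟩ := mem_ite_singleton h2
      obtain ⟨rfl, rfl⟩ := Prod.mk.injEq .. ▸ heq
      exact ⟨hO, rfl, Or.inr ⟨i + 1, j, by omega, hj, hc2,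
        Or.inl ⟨rfl, rfl⟩, rfl⟩⟩
    · obtain ⟨⟨hc1, hc2⟩, heq⟩ := mem_ite_singleton h3
      obtain ⟨rfl, rfl⟩ := Prod.mk.injEq .. ▸ heq
      exact ⟨hO, rfl, Or.inr ⟨i, j - 1, hi, by omega, hc2,
        Or.inr (Or.inr (Or.inr ⟨rfl, by omega⟩)), rfl⟩⟩
    · obtain ⟨⟨hc1, hc2⟩, heq⟩ := mem_ite_singleton h4
      obtain ⟨rfl, rfl⟩ := Prod.mk.injEq .. ▸ heq
      exact ⟨hO, rfl, Or.inr ⟨i, j + 1, hi, by omega, hc2,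
        Or.inr (Or.inr (Or.inl ⟨rfl, rfl⟩)), rfl⟩⟩

lemma mem_unionPairs_border {board : List (List String)} {rows cols i j : Nat}
    (hi : i < rows) (hj : j < cols) (hO : cellO board i j = true)
    (hb : i = 0 ∨ i = rows - 1 ∨ j = 0 ∨ j = cols - 1) :
    (i * cols + j, rows * cols) ∈ unionPairs board rows cols := by
  rw [unionPairs, List.mem_flatMap]
  refine ⟨(i, j), mem_cellList.2 ⟨hi, hj⟩, ?_⟩
  simp only [cellPairs, if_pos hO, if_pos hb]
  simp

lemma mem_unionPairs_adj {board : List (List String)} {rows cols i j i' j' : Nat}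
    (hi : i < rows) (hj : j < cols) (hO : cellO board i j = true)
    (hnb : ¬ (i = 0 ∨ i = rows - 1 ∨ j = 0 ∨ j = cols - 1))
    (hi' : i' < rows) (hj' : j' < cols) (hO' : cellO board i' j' = true)
    (hadj : adjacentCell i j i' j') :
    (i * cols + j, i' * cols + j') ∈ unionPairs board rows cols := by
  rw [unionPairs, List.mem_flatMap]
  refine ⟨(i, j), mem_cellList.2 ⟨hi, hj⟩, ?_⟩
  simp only [cellPairs, if_pos hO, if_neg hnb, List.mem_append]
  push_neg at hnb
  rcases hadj with ⟨e1, e2⟩ | ⟨e1, e2⟩ | ⟨e1, e2⟩ | ⟨e1, e2⟩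
  · refine (Or.inl (Or.inl (Or.inr ?_)))
    rw [if_pos (show i < rows - 1 ∧ cellO board (i+1) j = true from
      ⟨by omega, by rw [← e1, ← e2]; exact hO'⟩)]
    simp [e1, e2]
  · have h1 : i - 1 = i' := by omega
    refine Or.inl (Or.inl (Or.inl ?_))
    rw [if_pos (show 0 < i ∧ cellO board (i-1) j = true from
      ⟨by omega, by rw [h1, ← e2]; exact hO'⟩), h1]
    simp [e2]
  · refine Or.inr ?_
    rw [if_pos (show j < cols - 1 ∧ cellO board i (j+1) = true from
      ⟨by omega, by rw [← e2, ← e1]; exact hO'⟩)]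
    simp [e1, e2]
  · have h1 : j - 1 = j' := by omega
    refine Or.inl (Or.inr ?_)
    rw [if_pos (show 0 < j ∧ cellO board i (j-1) = true from
      ⟨by omega, by rw [h1, ← e1]; exact hO'⟩), h1]
    simp [e1]

-- EG over the pairs is reflexive-transitive closure of the symmetrised pair relation
lemma EG_iff_rtg {L : List (Nat × Nat)} {x y : Nat} :
    EG L x y ↔ Relation.ReflTransGen (fun u v => (u, v) ∈ L ∨ (v, u) ∈ L) x y := by
  constructor
  · intro h
    induction h with
    | rel u v huv => exact Relation.ReflTransGen.single (Or.inl huv)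
    | refl x => exact Relation.ReflTransGen.refl
    | symm x y _ ih =>
      exact Relation.ReflTransGen.symmetric (fun u v h => h.symm) ih
    | trans x y z _ _ ih1 ih2 => exact ih1.trans ih2
  · intro h
    induction h with
    | refl => exact Relation.EqvGen.refl _
    | tail _ hlast ih =>
      rcases hlast with h | h
      · exact Relation.EqvGen.trans _ _ _ ih (Relation.EqvGen.rel _ _ h)
      · exact Relation.EqvGen.trans _ _ _ ih
          (Relation.EqvGen.symm _ _ (Relation.EqvGen.rel _ _ h))

lemma adjacentCell_symm {i j i' j' : Nat} (h : adjacentCell i j i' j') :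
    adjacentCell i' j' i j := by
  rcases h with ⟨e1, e2⟩ | ⟨e1, e2⟩ | ⟨e1, e2⟩ | ⟨e1, e2⟩
  · exact Or.inr (Or.inl ⟨e1, e2.symm⟩)
  · exact Or.inl ⟨e1, e2.symm⟩
  · exact Or.inr (Or.inr (Or.inr ⟨e1.symm, e2⟩))
  · exact Or.inr (Or.inr (Or.inl ⟨e1.symm, e2⟩))

lemma eg_dummy_iff_reach {board : List (List String)} {i j : Nat}
    (hi : i < board.length) (hj : j < board.headI.length) :
    EG (unionPairs board board.length board.headI.length)
        (i * board.headI.length + j) (board.length * board.headI.length)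
      ↔ Reach board i j := by
  set rows := board.length with hrows
  set cols := board.headI.length with hcols
  set L := unionPairs board rows cols with hL
  constructor
  · intro h
    rw [EG_iff_rtg] at h
    have main : ∀ x, Relation.ReflTransGen (fun u v => (u, v) ∈ L ∨ (v, u) ∈ L) x (rows * cols) →
        x = rows * cols ∨ ∃ a b, a < rows ∧ b < cols ∧ x = a * cols + b ∧ Reach board a b := by
      intro x hx
      induction hx using Relation.ReflTransGen.head_induction_on with
      | refl => exact Or.inl rfl
      | head h' _ ih =>
        rename_i x' y' _
        rcases h' with hm | hm
        · obtain ⟨a, b, ha, hb, hO, rfl, hv⟩ := mem_unionPairs_elim hm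
          rcases hv with ⟨rfl, hbd⟩ | ⟨a', b', ha', hb', hO', hadj, rfl⟩
          · exact Or.inr ⟨a, b, ha, hb, rfl, Reach.base a b ha hb hO hbd⟩
          · rcases ih with hd | ⟨c, d, hc, hd2, hcd, hr⟩
            · exact absurd hd (by have := node_lt ha' hb'; omega)
            · obtain ⟨rfl, rfl⟩ := node_inj hb' hd2 hcd
              exact Or.inr ⟨a, b, ha, hb, rfl,
                Reach.step a b a' b' ha hb hO hadj hr⟩
        · obtain ⟨a, b, ha, hb, hO, hy, hv⟩ := mem_unionPairs_elim hm
          rcases hv with ⟨rfl, hbd⟩ | ⟨a', b', ha', hb', hO', hadj, rfl⟩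
          · exact Or.inl rfl
          · rcases ih with hd | ⟨c, d, hc, hd2, hcd, hr⟩
            · exact absurd (hy ▸ hd) (by have := node_lt ha hb; omega)
            · rw [hy] at hcd
              obtain ⟨rfl, rfl⟩ := node_inj hb hd2 hcd
              exact Or.inr ⟨a', b', ha', hb', rfl,
                Reach.step a' b' a b ha' hb' hO' (adjacentCell_symm hadj) hr⟩
    rcases main _ h with hd | ⟨a, b, ha, hb, hab, hr⟩
    · exact absurd hd (by have := node_lt hi hj; omega)
    · obtain ⟨rfl, rfl⟩ := node_inj hj hb hab
      exact hr
  · intro h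
    clear hi hj
    induction h with
    | base a b ha hb hO hbd =>
      exact Relation.EqvGen.rel _ _ (mem_unionPairs_border ha hb hO hbd)
    | step a b a' b' ha hb hO hadj hr ih =>
      by_cases hbd : a = 0 ∨ a = rows - 1 ∨ b = 0 ∨ b = cols - 1
      · exact Relation.EqvGen.rel _ _ (mem_unionPairs_border ha hb hO hbd)
      · obtain ⟨ha', hb', hO'⟩ := reach_bounds hr
        exact Relation.EqvGen.trans _ _ _
          (Relation.EqvGen.rel _ _ (mem_unionPairs_adj ha hb hO hbd ha' hb' hO' hadj)) ih

-- ---- B side ----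

def SoundSafe (board : List (List String)) (S : List (Nat × Nat)) : Prop :=
  ∀ p ∈ S, p.1 < board.length ∧ p.2 < board.headI.length ∧ Reach board p.1 p.2

-- the sweep body as a function of the cell pair
def sweepF (board : List (List String)) (rows cols : Nat)
    (st : PySem.Set (Nat × Nat) × Bool) (p : Nat × Nat) : PySem.Set (Nat × Nat) × Bool :=
  if ¬ PySem.Set.contains st.1 (p.1, p.2) ∧ cellO board p.1 p.2 ∧
      ((0 < p.1 ∧ PySem.Set.contains st.1 (p.1-1, p.2)) ∨
       (p.1 + 1 < rows ∧ PySem.Set.contains st.1 (p.1+1, p.2)) ∨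
       (0 < p.2 ∧ PySem.Set.contains st.1 (p.1, p.2-1)) ∨
       (p.2 + 1 < cols ∧ PySem.Set.contains st.1 (p.1, p.2+1)))
  then (PySem.Set.add st.1 (p.1, p.2), true) else st

lemma bSweep_eq (board : List (List String)) (rows cols : Nat) (safe : PySem.Set (Nat × Nat)) :
    bSweep board rows cols safe
      = (cellList rows cols).foldl (sweepF board rows cols) (safe, false) :=
  double_foldl_eq rows cols (sweepF board rows cols) (safe, false)

def nbProp (rows cols : Nat) (S : List (Nat × Nat)) (p : Nat × Nat) : Prop :=
  (0 < p.1 ∧ (p.1-1, p.2) ∈ S) ∨ (p.1 + 1 < rows ∧ (p.1+1, p.2) ∈ S) ∨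
  (0 < p.2 ∧ (p.1, p.2-1) ∈ S) ∨ (p.2 + 1 < cols ∧ (p.1, p.2+1) ∈ S)

lemma sweepF_cond_iff (board : List (List String)) (rows cols : Nat)
    (st : PySem.Set (Nat × Nat) × Bool) (p : Nat × Nat) :
    (¬ PySem.Set.contains st.1 (p.1, p.2) ∧ cellO board p.1 p.2 ∧
      ((0 < p.1 ∧ PySem.Set.contains st.1 (p.1-1, p.2)) ∨
       (p.1 + 1 < rows ∧ PySem.Set.contains st.1 (p.1+1, p.2)) ∨
       (0 < p.2 ∧ PySem.Set.contains st.1 (p.1, p.2-1)) ∨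
       (p.2 + 1 < cols ∧ PySem.Set.contains st.1 (p.1, p.2+1))))
    ↔ (p ∉ st.1 ∧ cellO board p.1 p.2 = true ∧ nbProp rows cols st.1 p) := by
  simp only [PySem.Set.contains_iff, nbProp]

lemma sweep_fold_inv (board : List (List String)) :
    ∀ (l : List (Nat × Nat)),
      (∀ p ∈ l, p.1 < board.length ∧ p.2 < board.headI.length) →
      ∀ st : PySem.Set (Nat × Nat) × Bool, st.1.Nodup → SoundSafe board st.1 →
      (l.foldl (sweepF board board.length board.headI.length) st).1.Nodup ∧
      SoundSafe board (l.foldl (sweepF board board.length board.headI.length) st).1 ∧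
      st.1 ⊆ (l.foldl (sweepF board board.length board.headI.length) st).1 ∧
      st.1.length ≤ (l.foldl (sweepF board board.length board.headI.length) st).1.length ∧
      ((l.foldl (sweepF board board.length board.headI.length) st).2 = false →
        st.2 = false ∧ (l.foldl (sweepF board board.length board.headI.length) st).1 = st.1 ∧
        ∀ p ∈ l, p ∉ st.1 → cellO board p.1 p.2 = true →
          ¬ nbProp board.length board.headI.length st.1 p) ∧
      (st.2 = false → (l.foldl (sweepF board board.length board.headI.length) st).2 = true →
        st.1.length < (l.foldl (sweepF board board.length board.headI.length) st).1.length) := by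
  intro l
  induction l with
  | nil =>
    intro _ st hnd hsn
    refine ⟨hnd, hsn, fun x hx => hx, le_refl _,
      fun h2 => ⟨h2, rfl, fun p hp => absurd hp (by simp)⟩, fun h1 h2 => ?_⟩
    rw [List.foldl_nil, h1] at h2
    exact absurd h2 (by simp)
  | cons p t ih =>
    intro hl st hnd hsn
    obtain ⟨hp1, hp2⟩ := hl p (List.mem_cons_self ..)
    have hlt : ∀ q ∈ t, q.1 < board.length ∧ q.2 < board.headI.length :=
      fun q hq => hl q (List.mem_cons_of_mem _ hq)
    simp only [List.foldl_cons]
    by_cases hc : p ∉ st.1 ∧ cellO board p.1 p.2 = true ∧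
        nbProp board.length board.headI.length st.1 p
    · have hstep : sweepF board board.length board.headI.length st p
          = (PySem.Set.add st.1 (p.1, p.2), true) := by
        rw [sweepF, if_pos ((sweepF_cond_iff board _ _ st p).2 hc)]
      obtain ⟨hnm, hO, hnb⟩ := hc
      have hadd : PySem.Set.add st.1 (p.1, p.2) = st.1 ++ [p] := by
        rw [PySem.Set.add_of_not_mem (by simpa using hnm)]
      have hrp : Reach board p.1 p.2 := by
        rcases hnb with ⟨hg, hm⟩ | ⟨hg, hm⟩ | ⟨hg, hm⟩ | ⟨hg, hm⟩
        · obtain ⟨ha, hb, hr⟩ := hsn _ hm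
          exact Reach.step p.1 p.2 (p.1-1) p.2 hp1 hp2 hO
            (Or.inr (Or.inl ⟨by omega, rfl⟩)) hr
        · obtain ⟨ha, hb, hr⟩ := hsn _ hm
          exact Reach.step p.1 p.2 (p.1+1) p.2 hp1 hp2 hO
            (Or.inl ⟨rfl, rfl⟩) hr
        · obtain ⟨ha, hb, hr⟩ := hsn _ hm
          exact Reach.step p.1 p.2 p.1 (p.2-1) hp1 hp2 hO
            (Or.inr (Or.inr (Or.inr ⟨rfl, by omega⟩))) hr
        · obtain ⟨ha, hb, hr⟩ := hsn _ hm
          exact Reach.step p.1 p.2 p.1 (p.2+1) hp1 hp2 hO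
            (Or.inr (Or.inr (Or.inl ⟨rfl, rfl⟩))) hr
      have hnd' : (PySem.Set.add st.1 (p.1, p.2)).Nodup := PySem.Set.nodup_add _ _ hnd
      have hsn' : SoundSafe board (PySem.Set.add st.1 (p.1, p.2)) := by
        intro q hq
        rcases (PySem.Set.mem_add _ _ _).1 hq with hq | hq
        · exact hsn q hq
        · subst hq; exact ⟨hp1, hp2, hrp⟩
      obtain ⟨c1, c2, c3, c4, c5, c6⟩ :=
        ih hlt (PySem.Set.add st.1 (p.1, p.2), true) hnd' hsn'
      have c4' : (PySem.Set.add st.1 (p.1, p.2)).length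
          ≤ (t.foldl (sweepF board board.length board.headI.length)
              (PySem.Set.add st.1 (p.1, p.2), true)).1.length := c4
      rw [hstep]
      have hsub : st.1 ⊆ PySem.Set.add st.1 (p.1, p.2) := by
        intro x hx; exact (PySem.Set.mem_add _ _ _).2 (Or.inl hx)
      have hlen : st.1.length < (PySem.Set.add st.1 (p.1, p.2)).length := by
        rw [hadd, List.length_append]; simp
      refine ⟨c1, c2, fun x hx => c3 (hsub hx), by omega, ?_, ?_⟩
      · intro hfalse
        exact absurd (c5 hfalse).1 (by simp)
      · intro _ _
        omega
    · have hstep : sweepF board board.length board.headI.length st p = st := by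
        rw [sweepF, if_neg (fun hh => hc ((sweepF_cond_iff board _ _ st p).1 hh))]
      rw [hstep]
      obtain ⟨c1, c2, c3, c4, c5, c6⟩ := ih hlt st hnd hsn
      refine ⟨c1, c2, c3, c4, ?_, c6⟩
      intro hfalse
      obtain ⟨e1, e2, e3⟩ := c5 hfalse
      refine ⟨e1, e2, ?_⟩
      intro q hq
      rcases List.mem_cons.1 hq with rfl | hq
      · intro hn hO hnb; exact hc ⟨hn, hO, hnb⟩
      · exact e3 q hq

lemma sound_length_le (board : List (List String)) (S : List (Nat × Nat))
    (hnd : S.Nodup) (hsn : SoundSafe board S) :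
    S.length ≤ board.length * board.headI.length := by
  classical
  rw [← List.toFinset_card_of_nodup hnd]
  have hsub : S.toFinset ⊆ Finset.range board.length ×ˢ Finset.range board.headI.length := by
    intro q hq
    obtain ⟨h1, h2, _⟩ := hsn q (List.mem_toFinset.1 hq)
    simp [Finset.mem_product, h1, h2]
  calc S.toFinset.card ≤ _ := Finset.card_le_card hsub
  _ = board.length * board.headI.length := by simp

lemma bLoop_spec (board : List (List String)) :
    ∀ (fuel : Nat) (S : List (Nat × Nat)), S.Nodup → SoundSafe board S →
      board.length * board.headI.length < S.length + fuel →
      ∃ R, bLoop board board.length board.headI.length fuel S = R ∧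
        R.Nodup ∧ SoundSafe board R ∧ S ⊆ R ∧
        R = (bSweep board board.length board.headI.length R).1 ∧
        (bSweep board board.length board.headI.length R).2 = false := by
  intro fuel
  induction fuel with
  | zero =>
    intro S hnd hsn hlen
    have := sound_length_le board S hnd hsn
    omega
  | succ f ih =>
    intro S hnd hsn hlen
    have hcl : ∀ p ∈ cellList board.length board.headI.length,
        p.1 < board.length ∧ p.2 < board.headI.length := by
      intro p hp; obtain ⟨i, j⟩ := p; exact mem_cellList.1 hp
    obtain ⟨c1, c2, c3, c4, c5, c6⟩ := sweep_fold_inv board _ hcl (S, false) hnd hsn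
    rw [← bSweep_eq] at c1 c2 c3 c4 c5 c6
    have hstep : bLoop board board.length board.headI.length (f + 1) S
        = (if (bSweep board board.length board.headI.length S).2
           then bLoop board board.length board.headI.length f
             (bSweep board board.length board.headI.length S).1
           else (bSweep board board.length board.headI.length S).1) := rfl
    by_cases hch : (bSweep board board.length board.headI.length S).2 = true
    · have hlt := c6 rfl hch
      have hlt2 : S.length < (bSweep board board.length board.headI.length S).1.length := by
        simpa using hlt
      obtain ⟨R, hR, r1, r2, r3, r4, r5⟩ :=
        ih (bSweep board board.length board.headI.length S).1 c1 c2 (by omega)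
      refine ⟨R, ?_, r1, r2, fun x hx => r3 (c3 hx), r4, r5⟩
      rw [hstep, if_pos hch]
      exact hR
    · have hfalse : (bSweep board board.length board.headI.length S).2 = false := by
        cases h : (bSweep board board.length board.headI.length S).2
        · rfl
        · exact absurd h hch
      obtain ⟨e1, e2, e3⟩ := c5 hfalse
      have e2' : (bSweep board board.length board.headI.length S).1 = S := by
        simpa using e2
      refine ⟨S, ?_, hnd, hsn, fun x hx => hx, e2'.symm, hfalse⟩
      rw [hstep, if_neg (by rw [hfalse]; simp)]
      exact e2' 

lemma foldl_add_if_mem {C : Nat × Nat → Prop} [DecidablePred C] :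
    ∀ (l : List (Nat × Nat)) (s : PySem.Set (Nat × Nat)) (q : Nat × Nat),
      (q ∈ l.foldl (fun s p => if C p then PySem.Set.add s p else s) s
        ↔ q ∈ s ∨ (q ∈ l ∧ C q)) := by
  intro l
  induction l with
  | nil => intro s q; simp
  | cons p t ih =>
    intro s q
    simp only [List.foldl_cons]
    by_cases hC : C p
    · rw [if_pos hC, ih]
      constructor
      · rintro (hq | ⟨hq, hcq⟩)
        · rcases (PySem.Set.mem_add _ _ _).1 hq with hq | rfl
          · exact Or.inl hq
          · exact Or.inr ⟨List.mem_cons_self .., hC⟩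
        · exact Or.inr ⟨List.mem_cons_of_mem _ hq, hcq⟩
      · rintro (hq | ⟨hq, hcq⟩)
        · exact Or.inl ((PySem.Set.mem_add _ _ _).2 (Or.inl hq))
        · rcases List.mem_cons.1 hq with rfl | hq
          · exact Or.inl ((PySem.Set.mem_add _ _ _).2 (Or.inr rfl))
          · exact Or.inr ⟨hq, hcq⟩
    · rw [if_neg hC, ih]
      constructor
      · rintro (hq | ⟨hq, hcq⟩)
        · exact Or.inl hq
        · exact Or.inr ⟨List.mem_cons_of_mem _ hq, hcq⟩
      · rintro (hq | ⟨hq, hcq⟩)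
        · exact Or.inl hq
        · rcases List.mem_cons.1 hq with rfl | hq
          · exact absurd hcq hC
          · exact Or.inr ⟨hq, hcq⟩

lemma foldl_add_if_nodup {C : Nat × Nat → Prop} [DecidablePred C] :
    ∀ (l : List (Nat × Nat)) (s : PySem.Set (Nat × Nat)), s.Nodup →
      (l.foldl (fun s p => if C p then PySem.Set.add s p else s) s).Nodup := by
  intro l
  induction l with
  | nil => intro s h; exact h
  | cons p t ih =>
    intro s h
    simp only [List.foldl_cons]
    by_cases hC : C p
    · rw [if_pos hC]; exact ih _ (PySem.Set.nodup_add _ _ h)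
    · rw [if_neg hC]; exact ih _ h

lemma bBorderSafe_eq (board : List (List String)) (rows cols : Nat) :
    bBorderSafe board rows cols
      = (cellList rows cols).foldl (fun s p =>
          if cellO board p.1 p.2 ∧ (p.1 = 0 ∨ p.1 = rows - 1 ∨ p.2 = 0 ∨ p.2 = cols - 1)
          then PySem.Set.add s (p.1, p.2) else s) PySem.Set.empty :=
  double_foldl_eq rows cols (fun s p =>
    if cellO board p.1 p.2 ∧ (p.1 = 0 ∨ p.1 = rows - 1 ∨ p.2 = 0 ∨ p.2 = cols - 1)
    then PySem.Set.add s (p.1, p.2) else s) PySem.Set.empty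

lemma mem_bBorderSafe (board : List (List String)) {q : Nat × Nat} :
    q ∈ bBorderSafe board board.length board.headI.length
      ↔ q.1 < board.length ∧ q.2 < board.headI.length ∧ cellO board q.1 q.2 = true ∧
        (q.1 = 0 ∨ q.1 = board.length - 1 ∨ q.2 = 0 ∨ q.2 = board.headI.length - 1) := by
  rw [bBorderSafe_eq]
  have : ∀ (s : PySem.Set (Nat × Nat)) p,
      (if cellO board p.1 p.2 ∧ (p.1 = 0 ∨ p.1 = board.length - 1 ∨ p.2 = 0 ∨
          p.2 = board.headI.length - 1) then PySem.Set.add s (p.1, p.2) else s)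
      = (if cellO board p.1 p.2 = true ∧ (p.1 = 0 ∨ p.1 = board.length - 1 ∨ p.2 = 0 ∨
          p.2 = board.headI.length - 1) then PySem.Set.add s p else s) := by
    intro s p; rfl
  simp only [this]
  rw [foldl_add_if_mem]
  constructor
  · rintro (hq | ⟨hq, hc⟩)
    · simp [PySem.Set.empty] at hq
    · obtain ⟨i, j⟩ := q
      obtain ⟨h1, h2⟩ := mem_cellList.1 hq
      exact ⟨h1, h2, hc⟩
  · rintro ⟨h1, h2, hc⟩
    refine Or.inr ⟨?_, hc⟩
    obtain ⟨i, j⟩ := q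
    exact mem_cellList.2 ⟨h1, h2⟩

lemma bBorderSafe_nodup (board : List (List String)) :
    (bBorderSafe board board.length board.headI.length).Nodup := by
  rw [bBorderSafe_eq]
  exact foldl_add_if_nodup _ _ List.nodup_nil

lemma bFinal_iff_reach (board : List (List String)) {i j : Nat}
    (hi : i < board.length) (hj : j < board.headI.length) :
    PySem.Set.contains (bLoop board board.length board.headI.length
        (board.length * board.headI.length + 1)
        (bBorderSafe board board.length board.headI.length)) (i, j) = true
      ↔ Reach board i j := by
  have hsn : SoundSafe board (bBorderSafe board board.length board.headI.length) := by
    intro q hq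
    obtain ⟨h1, h2, h3, h4⟩ := (mem_bBorderSafe board).1 hq
    exact ⟨h1, h2, Reach.base q.1 q.2 h1 h2 h3 h4⟩
  obtain ⟨R, hR, r1, r2, r3, r4, r5⟩ := bLoop_spec board
    (board.length * board.headI.length + 1)
    (bBorderSafe board board.length board.headI.length)
    (bBorderSafe_nodup board) hsn (by omega)
  rw [hR, PySem.Set.contains_iff]
  -- closedness of R
  have hcl : ∀ p ∈ cellList board.length board.headI.length,
      p.1 < board.length ∧ p.2 < board.headI.length := by
    intro p hp; obtain ⟨a, b⟩ := p; exact mem_cellList.1 hp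
  obtain ⟨c1, c2, c3, c4, c5, c6⟩ := sweep_fold_inv board _ hcl (R, false) r1 r2
  rw [← bSweep_eq] at c5
  obtain ⟨e1, e2, e3⟩ := c5 r5
  constructor
  · intro hm
    obtain ⟨_, _, hr⟩ := r2 _ hm
    exact hr
  · intro hr
    clear hi hj
    induction hr with
    | base a b ha hb hO hbd =>
      exact r3 ((mem_bBorderSafe board).2 ⟨ha, hb, hO, hbd⟩)
    | step a b a' b' ha hb hO hadj hr ih =>
      by_cases hm : (a, b) ∈ R
      · exact hm
      · exfalso
        obtain ⟨ha', hb', _⟩ := reach_bounds hr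
        refine e3 (a, b) (mem_cellList.2 ⟨ha, hb⟩) hm hO ?_
        rcases hadj with ⟨f1, f2⟩ | ⟨f1, f2⟩ | ⟨f1, f2⟩ | ⟨f1, f2⟩
        · exact Or.inr (Or.inl ⟨by omega, by rw [← f1, ← f2]; exact ih⟩)
        · exact Or.inl ⟨by omega, by rw [show a - 1 = a' by omega, ← f2]; exact ih⟩
        · exact Or.inr (Or.inr (Or.inr ⟨by omega, by rw [← f1, ← f2]; exact ih⟩))
        · exact Or.inr (Or.inr (Or.inl ⟨by omega, by rw [← f1, show b - 1 = b' by omega]; exact ih⟩))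

-- ---- rendering ----

lemma render_congr (board : List (List String)) (rows cols : Nat)
    (m₁ m₂ : Nat → Nat → String)
    (h : ∀ i j, i < rows → j < cols → m₁ i j = m₂ i j) :
    (List.range rows).foldl (fun b i =>
        (List.range cols).foldl (fun b j => b.set i ((b.getD i []).set j (m₁ i j))) b) board
      = (List.range rows).foldl (fun b i =>
        (List.range cols).foldl (fun b j => b.set i ((b.getD i []).set j (m₂ i j))) b) board := by
  apply PySem.List.foldl_congr_mem
  intro acc i hi
  apply PySem.List.foldl_congr_mem
  intro acc2 j hj
  rw [h i j (List.mem_range.1 hi) (List.mem_range.1 hj)]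

-- ===== VERDICT (by name: the statement is the Claim_ definition above) =====
lemma getD_replicate_zero (n k : Nat) :
    (List.replicate n (0 : Nat)).getD k 0 = 0 := by
  simp [List.getD_eq_getElem?_getD, List.getElem?_replicate]
  split <;> simp

lemma ufInv_init (n : Nat) :
    UFInv (List.replicate (n + 1) 0) id (fun _ => 0) := by
  refine ⟨?_, ?_, ?_, ?_, ?_⟩
  · intro k hk; rw [getD_replicate_zero]; simp
  · intro k _ _; exact ⟨rfl, rfl⟩
  · intro k _ h; exact absurd (getD_replicate_zero _ _) h
  · intro k _ h; exact h
  · intro k hk; exact hk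

theorem solve_spec : Claim_equal_solve := by
  intro board _ _
  unfold Spec_solve
  by_cases hemp : board.isEmpty
  · simp [solve, solve_alt, hemp]
  · have hempf : board.isEmpty = false := by simpa using hemp
    have hrows : 0 < board.length := by
      cases board with
      | nil => simp at hempf
      | cons r t => simp
    simp only [solve, solve_alt, hempf, Bool.false_eq_true, if_false]
    rw [unionLoop_eq_foldl_pairs board board.length board.headI.length
      (List.replicate (board.length * board.headI.length + 1) 0)]
    apply render_congr
    intro i j hi hj
    have hlen0 : (List.replicate (board.length * board.headI.length + 1) (0 : Nat)).length
        = board.length * board.headI.length + 1 := by simp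
    obtain ⟨ρF, depF, hInvF, hlenF, hcharF⟩ :=
      foldl_unionP_spec (unionPairs board board.length board.headI.length)
        (List.replicate (board.length * board.headI.length + 1) 0) id (fun _ => 0) []
        (ufInv_init (board.length * board.headI.length))
        (fun x y => ⟨fun h => EG_nil.2 h, fun h => EG_nil.1 h⟩)
        (by rw [hlen0]; exact mem_unionPairs_bounds hrows)
    set P := List.foldl unionP (List.replicate (board.length * board.headI.length + 1) 0)
      (unionPairs board board.length board.headI.length) with hP
    have hndlt : i * board.headI.length + j < P.length := by
      rw [hlenF, hlen0]; have := node_lt hi hj; omega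
    have hdult : board.length * board.headI.length < P.length := by
      rw [hlenF, hlen0]; omega
    have hfind1 : ufFind P P.length (i * board.headI.length + j)
        = ρF (i * board.headI.length + j) :=
      ufFind_eq_rho hInvF _ _ hndlt (dep_lt_len hInvF _ hndlt)
    have hfind2 : ufFind P P.length (board.length * board.headI.length)
        = ρF (board.length * board.headI.length) :=
      ufFind_eq_rho hInvF _ _ hdult (dep_lt_len hInvF _ hdult)
    have hAiff : (ufFind P P.length (i * board.headI.length + j)
        = ufFind P P.length (board.length * board.headI.length)) ↔ Reach board i j := by
      rw [hfind1, hfind2, hcharF]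
      simpa using eg_dummy_iff_reach hi hj
    have hBiff := bFinal_iff_reach board hi hj
    by_cases hR : Reach board i j
    · rw [if_pos (hAiff.2 hR), if_pos (hBiff.2 hR)]
    · rw [if_neg (fun hh => hR (hAiff.1 hh)), if_neg (fun hh => hR (hBiff.1 hh))]
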